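-- pv_equiv track=rewrite | github.com/pypi-data/pypi-mirror-372 | packages/laplaciannb/laplaciannb-0.8.0.tar.gz/laplaciannb-0.8.0/src/laplaciannb/fingerprint_utils.py | _generate_test_smiles
-- ===== SOURCE A (Python) =====
-- def _generate_test_smiles(n_molecules):
--     """Generate test SMILES strings for benchmarking."""
--     # Simple test molecules with varying complexity
--     base_smiles = [
--         "CCO",  # Ethanol
--         "CC(=O)OC1=CC=CC=C1C(=O)O",  # Aspirin
--         "CC(C)CC1=CC=C(C=C1)C(C)C(=O)O",  # Ibuprofen
--         "CCCCCCCCCCCCCCCC",  # Palmitic acid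
--         "CC1=CC=C(C=C1)C(=O)O",  # p-Toluic acid
--         "CCN(CC)CC",  # Triethylamine
--         "CC(C)(C)C1=CC=C(C=C1)O",  # BHT
--         "CCCCCCCCCCCCC",  # Tridecane
--         "CC1=CC(=CC(=C1)C)C(=O)O",  # Mesitylenic acid
--         "CCCCCCCCCC",  # Decane
--         "CC1=CC=CC=C1",  # Toluene
--         "C1=CC=CC=C1",  # Benzene
--         "CC(C)O",  # Isopropanol
--         "CCCCO",  # Butanol
--         "CC(C)C",  # Propane
--     ]
--
--     # Repeat base molecules to reach desired count
--     test_smiles = []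
--     while len(test_smiles) < n_molecules:
--         test_smiles.extend(base_smiles)
--
--     return test_smiles[:n_molecules]
-- ===== SOURCE B (Python) =====
-- def _generate_test_smiles(n_molecules):
--     """Generate test SMILES strings for benchmarking."""
--     base_smiles = [
--         "CCO",  # Ethanol
--         "CC(=O)OC1=CC=CC=C1C(=O)O",  # Aspirin
--         "CC(C)CC1=CC=C(C=C1)C(C)C(=O)O",  # Ibuprofen
--         "CCCCCCCCCCCCCCCC",  # Palmitic acid
--         "CC1=CC=C(C=C1)C(=O)O",  # p-Toluic acid
--         "CCN(CC)CC",  # Triethylamine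
--         "CC(C)(C)C1=CC=C(C=C1)O",  # BHT
--         "CCCCCCCCCCCCC",  # Tridecane
--         "CC1=CC(=CC(=C1)C)C(=O)O",  # Mesitylenic acid
--         "CCCCCCCCCC",  # Decane
--         "CC1=CC=CC=C1",  # Toluene
--         "C1=CC=CC=C1",  # Benzene
--         "CC(C)O",  # Isopropanol
--         "CCCCO",  # Butanol
--         "CC(C)C",  # Propane
--     ]
--     # Build each element directly by modular indexing: no overshoot, no slice.
--     return [base_smiles[i % len(base_smiles)] for i in range(n_molecules)]
-- ===== Notes on version B (the rewrite author's own statement) =====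
-- stated objective: simpler
-- what changed: Replaces the append-blocks-then-truncate while loop with a single comprehension that computes each element directly by modular index i % len(base_smiles), so no overshoot and no trailing slice.
import Mathlib
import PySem

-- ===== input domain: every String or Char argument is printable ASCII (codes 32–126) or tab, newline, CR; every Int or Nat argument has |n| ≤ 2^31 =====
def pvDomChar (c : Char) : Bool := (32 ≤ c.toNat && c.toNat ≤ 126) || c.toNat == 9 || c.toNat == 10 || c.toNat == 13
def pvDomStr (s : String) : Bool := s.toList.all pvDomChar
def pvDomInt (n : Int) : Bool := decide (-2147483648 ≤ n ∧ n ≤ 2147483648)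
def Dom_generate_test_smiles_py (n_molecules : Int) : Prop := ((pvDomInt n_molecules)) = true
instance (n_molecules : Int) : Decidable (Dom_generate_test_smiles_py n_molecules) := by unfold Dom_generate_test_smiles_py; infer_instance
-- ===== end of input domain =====

-- B replaces A's extend-then-slice while loop by one modular-index comprehension (objective: simpler).

-- ===== PORT A =====
def pvBase : List String :=
  ["CCO", "CC(=O)OC1=CC=CC=C1C(=O)O", "CC(C)CC1=CC=C(C=C1)C(C)C(=O)O",
   "CCCCCCCCCCCCCCCC", "CC1=CC=C(C=C1)C(=O)O", "CCN(CC)CC",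
   "CC(C)(C)C1=CC=C(C=C1)O", "CCCCCCCCCCCCC", "CC1=CC(=CC(=C1)C)C(=O)O",
   "CCCCCCCCCC", "CC1=CC=CC=C1", "C1=CC=CC=C1", "CC(C)O", "CCCCO", "CC(C)C"]

-- while len(test_smiles) < n_molecules: test_smiles.extend(base_smiles)
def pvLoopA (n : Int) (ts : List String) : List String :=
  if (ts.length : Int) < n then pvLoopA n (ts ++ pvBase) else ts
termination_by (n - ts.length).toNat
decreasing_by simp [pvBase]; omega

def generate_test_smiles_py (n_molecules : Int) : List String :=
  PySem.List.slice (pvLoopA n_molecules []) none (some n_molecules)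

-- ===== PORT B =====
-- [base_smiles[i % len(base_smiles)] for i in range(n_molecules)]
-- pyGetD with default "" is exact here: i % 15 is always a valid index.
def generate_test_smiles_py_alt (n_molecules : Int) : List String :=
  (PySem.List.pyRange 0 n_molecules 1).map
    (fun i => PySem.List.pyGetD pvBase (PySem.Int.mod i (pvBase.length : Int)) "")

-- ===== PRECONDITION & SPEC =====
def Spec_generate_test_smiles_py (n_molecules : Int) (out : List String) : Prop := out = generate_test_smiles_py_alt n_molecules
instance (n_molecules : Int) (out : List String) : Decidable (Spec_generate_test_smiles_py n_molecules out) := by unfold Spec_generate_test_smiles_py; infer_instance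

-- ===== CLAIM (what is proved, stated in full; the proofs are below) =====
def Claim_equal_generate_test_smiles_py : Prop := ∀ (n_molecules : Int), Dom_generate_test_smiles_py n_molecules → Spec_generate_test_smiles_py n_molecules (generate_test_smiles_py n_molecules)

-- ===== LEMMAS AND PROOFS =====

theorem pvBase_length : pvBase.length = 15 := by decide

-- loop invariant: length multiple of 15, elements follow the modular pattern; result reaches n
theorem pvLoopA_spec (n : Int) (ts : List String)
    (hdvd : 15 ∣ ts.length)
    (hel : ∀ j, j < ts.length → ts[j]? = pvBase[j % 15]?) :
    (15 ∣ (pvLoopA n ts).length) ∧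
    (n ≤ ((pvLoopA n ts).length : Int)) ∧
    (∀ j, j < (pvLoopA n ts).length → (pvLoopA n ts)[j]? = pvBase[j % 15]?) := by
  unfold pvLoopA
  split
  · rename_i h
    refine pvLoopA_spec n (ts ++ pvBase) ?_ ?_
    · simp [pvBase_length]; omega
    · intro j hj
      simp only [List.length_append, pvBase_length] at hj
      by_cases hlt : j < ts.length
      · rw [List.getElem?_append_left hlt]; exact hel j hlt
      · push_neg at hlt
        rw [List.getElem?_append_right hlt]
        congr 1
        obtain ⟨k, hk⟩ := hdvd
        omega
  · rename_i h
    exact ⟨hdvd, by omega, hel⟩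
termination_by (n - ts.length).toNat
decreasing_by simp [pvBase]; omega

-- ===== VERDICT (by name: the statement is the Claim_ definition above) =====
theorem generate_test_smiles_py_spec : Claim_equal_generate_test_smiles_py := by
  unfold Claim_equal_generate_test_smiles_py
  intro n _
  unfold Spec_generate_test_smiles_py generate_test_smiles_py generate_test_smiles_py_alt
  obtain ⟨hdvd, hlen, hel⟩ := pvLoopA_spec n [] (by simp) (by simp)
  by_cases hn : n ≤ 0
  · have hB : PySem.List.pyRange 0 n 1 = [] := PySem.List.pyRange_one_eq_nil (by omega)
    have hA : pvLoopA n [] = [] := by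
      unfold pvLoopA; simp; omega
    rw [hA, hB]
    simp [PySem.List.slice]
  · push_neg at hn
    rw [PySem.List.slice_to _ (by omega)]
    rw [PySem.List.pyRange_one 0 n]
    simp only [sub_zero, zero_add]
    apply List.ext_getElem?
    intro j
    by_cases hj : j < n.toNat
    · rw [List.getElem?_take_of_lt hj, hel j (by omega)]
      rw [List.getElem?_map, List.getElem?_map, List.getElem?_range hj]
      simp only [Option.map_some]
      have : PySem.Int.mod ((j : Int)) (pvBase.length : Int)
          = ((j % 15 : Nat) : Int) := by
        rw [pvBase_length]
        exact PySem.Int.mod_natCast j 15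
      rw [this]
      rw [PySem.List.pyGetD_natCast]
      have hj15 : j % 15 < pvBase.length := by rw [pvBase_length]; omega
      simp [List.getD, List.getElem?_eq_getElem hj15]
    · have h1 : (List.take n.toNat (pvLoopA n [])).length ≤ j := by
        simp; omega
      rw [List.getElem?_eq_none h1, List.getElem?_eq_none (by simp; omega)]
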